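-- pv_equiv track=rewrite | github.com/bharathulaganathan/advent_of_code | 2015/11/2.py | check_pair
-- ===== SOURCE A (Python) =====
-- def check_pair(pwd):
--     pair_counter = 0
--     counter = 0
--     while counter < len(pwd) - 1:
--         if pwd[counter] == pwd[counter + 1]:
--             pair_counter += 1
--             counter += 2
--         else:
--             counter += 1
--     if pair_counter >= 2:
--         return True
--     return False
-- ===== SOURCE B (Python) =====
-- def check_pair(pwd):
--     # Run-length encode the password, then sum floor(run_len/2) over the runs:
--     # each maximal run of L equal characters contributes exactly L//2
--     # non-overlapping pairs.
--     runs = []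
--     prev = None
--     for ch in pwd:
--         if runs and ch == prev:
--             runs[-1] += 1
--         else:
--             runs.append(1)
--         prev = ch
--     return sum(r // 2 for r in runs) >= 2
-- ===== Notes on version B (the rewrite author's own statement) =====
-- stated objective: alternative
-- what changed: Replaces A's greedy index loop (skip 2 after a matched pair) by a two-stage run-length encoding: first build the list of maximal run lengths, then sum floor(len/2) over the runs and compare with 2.
import Mathlib
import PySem

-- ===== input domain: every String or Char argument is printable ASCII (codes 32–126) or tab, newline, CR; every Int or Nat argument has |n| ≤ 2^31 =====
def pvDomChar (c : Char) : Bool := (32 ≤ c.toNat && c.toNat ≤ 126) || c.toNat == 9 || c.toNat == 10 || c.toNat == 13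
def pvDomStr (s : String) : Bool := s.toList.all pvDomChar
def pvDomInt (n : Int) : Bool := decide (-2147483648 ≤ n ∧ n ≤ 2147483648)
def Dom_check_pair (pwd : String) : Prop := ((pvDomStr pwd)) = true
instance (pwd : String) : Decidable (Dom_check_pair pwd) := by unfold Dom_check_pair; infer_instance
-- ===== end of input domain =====

-- B replaces A's greedy index loop by run-length encoding followed by a sum of len/2 (alternative decomposition, same cost).

-- ===== PORT A =====
-- A's while loop: counter walks the indices, skipping 2 after a matched pair, else 1.
def checkPairLoopA (s : List Char) (pair_counter counter : Nat) : Nat :=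
  if counter < s.length - 1 then
    if s.getD counter ' ' == s.getD (counter + 1) ' ' then
      checkPairLoopA s (pair_counter + 1) (counter + 2)
    else
      checkPairLoopA s pair_counter (counter + 1)
  else pair_counter
termination_by s.length - counter
decreasing_by all_goals omega

def check_pair (pwd : String) : Bool :=
  if checkPairLoopA pwd.toList 0 0 ≥ 2 then true else false

-- ===== PORT B =====
-- Port of Source B's for-loop building the list of maximal run lengths
-- ('runs[-1] += 1' = bump the last entry, else append 1; prev starts as None).
def buildRuns : List Char → Option Char → List Nat → List Nat
  | [], _, runs => runs
  | ch :: rest, prev, runs =>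
    if runs ≠ [] ∧ some ch == prev then
      buildRuns rest (some ch) (runs.dropLast ++ [runs.getLastD 0 + 1])
    else
      buildRuns rest (some ch) (runs ++ [1])

def check_pair_alt (pwd : String) : Bool :=
  decide (((buildRuns pwd.toList none []).map (fun r => r / 2)).sum ≥ 2)

-- ===== PRECONDITION & SPEC =====
def Spec_check_pair (pwd : String) (out : Bool) : Prop := out = check_pair_alt pwd
instance (pwd : String) (out : Bool) : Decidable (Spec_check_pair pwd out) := by unfold Spec_check_pair; infer_instance

-- ===== CLAIM (what is proved, stated in full; the proofs are below) =====
def Claim_equal_check_pair : Prop := ∀ (pwd : String), Dom_check_pair pwd → Spec_check_pair pwd (check_pair pwd)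

-- ===== LEMMAS AND PROOFS =====

-- Proof-only characterisation of A's greedy pair count as structural recursion.
def pairMatches : List Char → Nat
  | a :: b :: rest => if a == b then pairMatches rest + 1 else pairMatches (b :: rest)
  | _ => 0

theorem checkPairLoopA_eq_pairMatches (s : List Char) (pair counter : Nat) :
    checkPairLoopA s pair counter = pair + pairMatches (s.drop counter) := by
  generalize hn : s.length - counter = n
  induction n using Nat.strong_induction_on generalizing pair counter with
  | _ n ih =>
  unfold checkPairLoopA
  by_cases h : counter < s.length - 1
  · have h1 : counter < s.length := by omega
    have h2 : counter + 1 < s.length := by omega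
    have hd : s.drop counter = s[counter] :: s[counter+1] :: s.drop (counter + 2) := by
      rw [List.drop_eq_getElem_cons h1, List.drop_eq_getElem_cons h2]
    have g1 : s.getD counter ' ' = s[counter] := List.getD_eq_getElem s ' ' h1
    have g2 : s.getD (counter+1) ' ' = s[counter+1] := List.getD_eq_getElem s ' ' h2
    simp only [h, if_true, g1, g2, hd]
    by_cases he : s[counter] = s[counter+1]
    · simp only [he, beq_self_eq_true, if_true, pairMatches]
      rw [ih (s.length - (counter+2)) (by omega) (pair+1) (counter+2) rfl]
      omega
    · have hb : (s[counter] == s[counter+1]) = false := beq_eq_false_iff_ne.mpr he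
      simp only [hb, Bool.false_eq_true, if_false, pairMatches]
      rw [ih (s.length - (counter+1)) (by omega) pair (counter+1) rfl]
      rw [List.drop_eq_getElem_cons h2]
  · simp only [h, if_false]
    match hds : s.drop counter with
    | [] => simp [pairMatches]
    | [a] => simp [pairMatches]
    | a :: b :: t =>
      exfalso
      have hl := congrArg List.length hds
      simp [List.length_drop] at hl
      omega

-- Proof-only accumulator view of B: current run char a with length k, then the tail.
def runsAux : Char → Nat → List Char → Nat
  | _, k, [] => k / 2
  | a, k, b :: t => if b == a then runsAux a (k + 1) t else k / 2 + runsAux b 1 t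

theorem pairMatches_replicate (k : Nat) (a : Char) (t : List Char)
    (ht : t = [] ∨ ∃ b t', t = b :: t' ∧ b ≠ a) :
    pairMatches (List.replicate k a ++ t) = k / 2 + pairMatches t := by
  induction k using Nat.strong_induction_on generalizing t with
  | _ k ih =>
  match k with
  | 0 => simp
  | 1 =>
    rcases ht with rfl | ⟨b, t', rfl, hb⟩
    · simp [pairMatches]
    · have : (a == b) = false := beq_eq_false_iff_ne.mpr (Ne.symm hb)
      simp [pairMatches, this]
  | k + 2 =>
    have : List.replicate (k + 2) a ++ t = a :: a :: (List.replicate k a ++ t) := by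
      simp [List.replicate_succ]
    rw [this]
    simp only [pairMatches, beq_self_eq_true, if_true]
    rw [ih k (by omega) t ht]
    omega

theorem runsAux_eq (t : List Char) (a : Char) (k : Nat) :
    runsAux a k t = pairMatches (List.replicate k a ++ t) := by
  induction t generalizing a k with
  | nil =>
    have h := pairMatches_replicate k a [] (Or.inl rfl)
    simp only [List.append_nil, pairMatches] at h
    simp [runsAux, h]
  | cons b t' ih =>
    by_cases hb : b = a
    · subst hb
      simp only [runsAux, beq_self_eq_true, if_true]
      rw [ih b (k + 1)]
      congr 1
      rw [List.replicate_succ' (n := k)]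
      simp
    · have hbeq : (b == a) = false := beq_eq_false_iff_ne.mpr hb
      simp only [runsAux, hbeq, Bool.false_eq_true, if_false]
      rw [ih b 1,
        pairMatches_replicate k a (b :: t') (Or.inr ⟨b, t', rfl, hb⟩)]
      simp

theorem buildRuns_inv (t : List Char) (a : Char) (k : Nat) (acc : List Nat) :
    ((buildRuns t (some a) (acc ++ [k])).map (fun r => r / 2)).sum
      = ((acc.map (fun r => r / 2)).sum) + runsAux a k t := by
  induction t generalizing a k acc with
  | nil => simp [buildRuns, runsAux]
  | cons ch rest ih =>
    by_cases hc : ch = a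
    · subst hc
      have hguard : (acc ++ [k] ≠ [] ∧ (some ch == some ch) = true) := by simp
      simp only [buildRuns, if_pos hguard]
      have hdl : (acc ++ [k]).dropLast = acc := by simp
      have hgl : (acc ++ [k]).getLastD 0 = k := by simp
      rw [hdl, hgl, ih ch (k + 1) acc]
      simp [runsAux]
    · have hbeq : (some ch == some a) = false := by
        simp [beq_eq_false_iff_ne.mpr hc]
      have hguard : ¬ (acc ++ [k] ≠ [] ∧ (some ch == some a) = true) := by
        simp [hbeq]
      simp only [buildRuns, if_neg hguard]
      have : acc ++ [k] ++ [1] = (acc ++ [k]) ++ [1] := rfl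
      rw [this, ih ch 1 (acc ++ [k])]
      have hcb : (ch == a) = false := beq_eq_false_iff_ne.mpr hc
      simp [runsAux, hcb]
      omega

theorem counts_eq (l : List Char) :
    ((buildRuns l none []).map (fun r => r / 2)).sum = pairMatches l := by
  match l with
  | [] => simp [buildRuns, pairMatches]
  | a :: t =>
    have hguard : ¬ (([] : List Nat) ≠ [] ∧ (some a == (none : Option Char)) = true) := by
      simp
    simp only [buildRuns, if_neg hguard]
    have : ([] : List Nat) ++ [1] = [] ++ [1] := rfl
    rw [List.nil_append, show ([1] : List Nat) = [] ++ [1] from rfl,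
      buildRuns_inv t a 1 [], runsAux_eq t a 1]
    simp

-- ===== VERDICT (by name: the statement is the Claim_ definition above) =====
theorem check_pair_spec : Claim_equal_check_pair := by
  intro pwd _
  unfold Spec_check_pair check_pair check_pair_alt
  rw [checkPairLoopA_eq_pairMatches, counts_eq]
  simp
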